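-- pv_equiv track=rewrite | github.com/sykim1223/codingTest_with_Python | Baekjoon/BJ_1388.py | cnt_wood
-- ===== SOURCE A (Python) =====
-- def cnt_wood(array, n, m):
--   result = 0 #전체 갯수
--   tmp = 0
--
-- #행에 대해 - 갯수 카운트
--   for i in range(n):
--     for j in range(m):
--       if array[i][j] == '-':
--        tmp = tmp+1
--       elif tmp!=0 and array[i][j]=='|':
--         result = result+1
--         tmp = 0
--     if tmp !=0:
--       result = result+1
--     tmp = 0
--
--
-- #열에 대해 | 갯수 카운트
--   for i in range(m):
--     for j in range(n):
--       if array[j][i] == '|':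
--        tmp = tmp+1
--       elif tmp!=0 and array[j][i]=='-':
--         result = result+1
--         tmp = 0
--     if tmp !=0:
--       result = result+1
--     tmp = 0
--
-- #합산하여 반환
--   return result
-- ===== SOURCE B (Python) =====
-- def split_cells(cells, delim):
--     # split a list of cell strings on the delimiter cell, keeping empty pieces
--     pieces, cur = [], []
--     for c in cells:
--         if c == delim:
--             pieces.append(cur)
--             cur = []
--         else:
--             cur.append(c)
--     pieces.append(cur)
--     return pieces
--
--
-- def count_pieces(cells, delim, target):
--     # number of delimiter-separated pieces that contain the target cell
--     return sum(1 for p in split_cells(cells, delim) if target in p)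
--
--
-- def cnt_wood(array, n, m):
--     if n <= 0 or m <= 0:
--         return 0
--     rows = [list(array[i][:m]) for i in range(n)]
--     cols = [[row[j] for row in rows] for j in range(m)]
--     return sum(count_pieces(r, '|', '-') for r in rows) + \
--            sum(count_pieces(c, '-', '|') for c in cols)
-- ===== Notes on version B (the rewrite author's own statement) =====
-- stated objective: simpler
-- what changed: Replaces A's result/tmp counter state machine threaded through two index-loop nests by building the truncated rows and columns once and counting, per line, the delimiter-separated pieces (split on the opposite symbol) that contain the run symbol.
import Mathlib
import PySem

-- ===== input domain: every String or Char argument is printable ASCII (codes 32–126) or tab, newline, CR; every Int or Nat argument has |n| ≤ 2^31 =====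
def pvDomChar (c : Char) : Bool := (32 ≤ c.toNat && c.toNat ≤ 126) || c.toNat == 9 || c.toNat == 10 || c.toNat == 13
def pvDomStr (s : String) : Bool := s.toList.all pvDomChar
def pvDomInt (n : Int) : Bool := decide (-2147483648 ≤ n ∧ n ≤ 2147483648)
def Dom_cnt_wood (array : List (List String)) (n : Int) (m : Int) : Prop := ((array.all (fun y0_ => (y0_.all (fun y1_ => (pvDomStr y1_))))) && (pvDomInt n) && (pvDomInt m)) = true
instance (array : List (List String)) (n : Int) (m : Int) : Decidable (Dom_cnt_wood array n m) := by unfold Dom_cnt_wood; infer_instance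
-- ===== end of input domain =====

-- B replaces A's result/tmp state machine with delimiter-splitting of each row/column
-- and counting pieces containing the run symbol (objective: simpler; equal cost).


-- ===== PORT A =====
def cnt_wood (array : List (List String)) (n : Int) (m : Int) : Int :=
  -- result/tmp pair threaded through the row nest (count '-' runs broken by '|'),
  -- then through the column nest (count '|' runs broken by '-'); final result is .1
  ((PySem.List.pyRange 0 m 1).foldl (fun (st : Int × Int) i =>
      let st2 := (PySem.List.pyRange 0 n 1).foldl (fun (st : Int × Int) j =>
          let c := PySem.List.pyGetD (PySem.List.pyGetD array j []) i ""
          if c = "|" then (st.1, st.2 + 1)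
          else if st.2 ≠ 0 ∧ c = "-" then (st.1 + 1, 0)
          else st) st
      (if st2.2 ≠ 0 then st2.1 + 1 else st2.1, 0))
    ((PySem.List.pyRange 0 n 1).foldl (fun (st : Int × Int) i =>
      let st2 := (PySem.List.pyRange 0 m 1).foldl (fun (st : Int × Int) j =>
          let c := PySem.List.pyGetD (PySem.List.pyGetD array i []) j ""
          if c = "-" then (st.1, st.2 + 1)
          else if st.2 ≠ 0 ∧ c = "|" then (st.1 + 1, 0)
          else st) st
      (if st2.2 ≠ 0 then st2.1 + 1 else st2.1, 0)) (0, 0))).1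

-- ===== PORT B =====
-- split a list of cell strings on the delimiter cell, keeping empty pieces
def splitCells (cells : List String) (delim : String) : List (List String) :=
  let st := cells.foldl (fun (st : List (List String) × List String) c =>
      if c = delim then (st.1 ++ [st.2], []) else (st.1, st.2 ++ [c])) ([], [])
  st.1 ++ [st.2]

-- number of delimiter-separated pieces that contain the target cell
def countPieces (cells : List String) (delim : String) (target : String) : Int :=
  ((splitCells cells delim).countP (fun p => decide (target ∈ p)) : Nat)

def cnt_wood_alt (array : List (List String)) (n : Int) (m : Int) : Int :=
  if n ≤ 0 ∨ m ≤ 0 then 0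
  else
    let rows := (PySem.List.pyRange 0 n 1).map
      (fun i => PySem.List.slice (PySem.List.pyGetD array i []) none (some m))
    let cols := (PySem.List.pyRange 0 m 1).map
      (fun j => rows.map (fun row => PySem.List.pyGetD row j ""))
    (rows.map (fun r => countPieces r "|" "-")).sum
      + (cols.map (fun c => countPieces c "-" "|")).sum

-- ===== PRECONDITION & SPEC =====
-- Pre_: exactly the inputs where A raises no IndexError: whenever both dimensions are
-- positive, array must have at least n rows and each of the first n rows at least m cells.
def Pre_cnt_wood (array : List (List String)) (n : Int) (m : Int) : Prop :=
  (0 < n ∧ 0 < m) →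
    (n.toNat ≤ array.length ∧ ∀ r ∈ array.take n.toNat, m.toNat ≤ r.length)
instance (array : List (List String)) (n : Int) (m : Int) : Decidable (Pre_cnt_wood array n m) := by
  unfold Pre_cnt_wood; infer_instance

def pvWitness_cnt_wood : List (List String) × Int × Int :=
  ([["-", "|"], ["|", "-"]], 2, 2)

def Spec_cnt_wood (array : List (List String)) (n : Int) (m : Int) (out : Int) : Prop := out = cnt_wood_alt array n m
instance (array : List (List String)) (n : Int) (m : Int) (out : Int) : Decidable (Spec_cnt_wood array n m out) := by unfold Spec_cnt_wood; infer_instance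

-- ===== CLAIM (what is proved, stated in full; the proofs are below) =====
def Claim_equal_cnt_wood : Prop := ∀ (array : List (List String)) (n : Int) (m : Int), Dom_cnt_wood array n m → Pre_cnt_wood array n m → Spec_cnt_wood array n m (cnt_wood array n m)

-- ===== LEMMAS AND PROOFS =====

-- canonical per-line count: number of delim-separated runs containing target,
-- b = "current piece already contains target"
def runCnt (delim target : String) : List String → Bool → Nat
  | [], b => if b then 1 else 0
  | c :: cs, b =>
      if c = delim then (if b then 1 else 0) + runCnt delim target cs false
      else runCnt delim target cs (b || decide (c = target))

lemma pyGetD_take_eq {α : Type} (xs : List α) (d : α) (M : Nat) (i : Int)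
    (h0 : 0 ≤ i) (hi : i < (M : Int)) (hM : M ≤ xs.length) :
    PySem.List.pyGetD (xs.take M) i d = PySem.List.pyGetD xs i d := by
  have hlt : i < ((xs.take M).length : Int) := by
    simp only [List.length_take]; omega
  rw [PySem.List.pyGetD_eq_getElem _ d h0 hlt,
      PySem.List.pyGetD_eq_getElem _ d h0 (by omega)]
  apply List.getElem_take

lemma foldl_pyRange_take {α β : Type} (xs : List α) (d : α) (M : Nat) (hM : M ≤ xs.length)
    (f : β → α → β) (init : β) :
    List.foldl (fun acc j => f acc (PySem.List.pyGetD xs j d)) init (PySem.List.pyRange 0 (M : Int) 1)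
      = List.foldl f init (xs.take M) := by
  rw [← PySem.List.foldl_pyRange_zero_pyGetD (xs.take M) d f init]
  have hlen : PySem.List.len (xs.take M) = (M : Int) := by
    simp [PySem.List.len]; omega
  rw [hlen]
  apply PySem.List.foldl_congr_mem
  intro acc j hj
  rw [PySem.List.mem_pyRange_one] at hj
  rw [pyGetD_take_eq xs d M j hj.1 hj.2 hM]

lemma map_pyRange_take {α : Type} (xs : List α) (d : α) (M : Nat) (hM : M ≤ xs.length) :
    List.map (fun j => PySem.List.pyGetD xs j d) (PySem.List.pyRange 0 (M : Int) 1)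
      = xs.take M := by
  rw [← PySem.List.map_pyGetD_pyRange_zero (xs.take M) d]
  have hlen : PySem.List.len (xs.take M) = (M : Int) := by
    simp [PySem.List.len]; omega
  rw [hlen]
  apply List.map_congr_left
  intro j hj
  rw [PySem.List.mem_pyRange_one] at hj
  rw [pyGetD_take_eq xs d M j hj.1 hj.2 hM]

-- A's per-line state machine equals runCnt
lemma lineA (delim target : String) (hdt : delim ≠ target) :
    ∀ (cells : List String) (r t : Int), 0 ≤ t →
    (let st := cells.foldl (fun (st : Int × Int) c =>
        if c = target then (st.1, st.2 + 1)
        else if st.2 ≠ 0 ∧ c = delim then (st.1 + 1, 0)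
        else st) (r, t)
     (if st.2 ≠ 0 then st.1 + 1 else st.1)) =
    r + (runCnt delim target cells (decide (t ≠ 0)) : Int) := by
  intro cells
  induction cells with
  | nil =>
    intro r t ht
    by_cases h : t = 0 <;> simp [runCnt, h]
  | cons c cs ih =>
    intro r t ht
    by_cases hct : c = target
    · subst hct
      have htd : ¬ (c = delim) := fun h => hdt h.symm
      have h1 : ¬ (t + 1 = 0) := by omega
      simpa [runCnt, htd, h1] using ih r (t + 1) (by omega)
    · by_cases hcd : c = delim
      · subst hcd
        by_cases ht0 : t = 0
        · subst ht0
          simpa [runCnt, hdt, hct] using ih r 0 le_rfl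
        · simpa [runCnt, hdt, hct, ht0, add_assoc] using ih (r + 1) 0 le_rfl
      · simpa [runCnt, hct, hcd] using ih r t ht

-- A's outer row loop: fold of per-line finalization accumulates the line counts
lemma rowFold (delim target : String) (hdt : delim ≠ target) :
    ∀ (L : List (List String)) (r : Int),
    L.foldl (fun (st : Int × Int) cells =>
        let st2 := cells.foldl (fun (st : Int × Int) c =>
            if c = target then (st.1, st.2 + 1)
            else if st.2 ≠ 0 ∧ c = delim then (st.1 + 1, 0)
            else st) st
        (if st2.2 ≠ 0 then st2.1 + 1 else st2.1, 0)) (r, 0)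
      = (r + (L.map (fun cells => (runCnt delim target cells false : Int))).sum, 0) := by
  intro L
  induction L with
  | nil => intro r; simp
  | cons cells L ih =>
    intro r
    have h := lineA delim target hdt cells r 0 le_rfl
    have h0 : (decide ((0:Int) ≠ 0)) = false := by decide
    rw [h0] at h
    set f := (fun (st : Int × Int) (cells : List String) =>
        let st2 := cells.foldl (fun (st : Int × Int) c =>
            if c = target then (st.1, st.2 + 1)
            else if st.2 ≠ 0 ∧ c = delim then (st.1 + 1, 0)
            else st) st
        (if st2.2 ≠ 0 then st2.1 + 1 else st2.1, (0 : Int))) with hf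
    rw [List.foldl_cons]
    have h2 : f (r, (0 : Int)) cells = (r + (runCnt delim target cells false : Int), 0) := by
      rw [hf]; exact Prod.ext_iff.mpr ⟨h, rfl⟩
    rw [h2, ih (r + (runCnt delim target cells false : Int)), List.map_cons, List.sum_cons,
        add_assoc]

-- B's splitter invariant: counting pieces containing target = runCnt
lemma splitInv (delim target : String) :
    ∀ (cells : List String) (ps : List (List String)) (cur : List String),
    (let st := cells.foldl (fun (st : List (List String) × List String) c =>
        if c = delim then (st.1 ++ [st.2], []) else (st.1, st.2 ++ [c])) (ps, cur)
     (st.1 ++ [st.2]).countP (fun p => decide (target ∈ p)))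
      = ps.countP (fun p => decide (target ∈ p))
        + runCnt delim target cells (decide (target ∈ cur)) := by
  intro cells
  induction cells with
  | nil =>
    intro ps cur
    by_cases h : target ∈ cur <;> simp [List.countP_append, runCnt, h]
  | cons c cs ih =>
    intro ps cur
    by_cases hcd : c = delim
    · have hthis := ih (ps ++ [cur]) []
      by_cases h : target ∈ cur <;>
        simp [hcd, runCnt, h, List.countP_append] at hthis ⊢ <;> omega
    · have hthis := ih ps (cur ++ [c])
      have hb : decide (target ∈ cur ++ [c]) = (decide (target ∈ cur) || decide (c = target)) := by
        by_cases h1 : target ∈ cur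
        · simp [List.mem_append, h1]
        · by_cases h2 : c = target
          · simp [List.mem_append, h1, h2]
          · have h3 : ¬ target = c := fun hh => h2 hh.symm
            simp [List.mem_append, h1, h2, h3]
      rw [hb] at hthis
      simpa [runCnt, hcd] using hthis

lemma countPieces_eq (cells : List String) (delim target : String) :
    countPieces cells delim target = (runCnt delim target cells false : Int) := by
  have h := splitInv delim target cells [] []
  simp only [List.countP_nil, List.not_mem_nil, decide_false, Nat.zero_add] at h
  unfold countPieces splitCells
  exact_mod_cast h

-- when a dimension is nonpositive every pass is a no-op
lemma trivFold (l : List Int) :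
    l.foldl (fun (st : Int × Int) _ => (if st.2 ≠ 0 then st.1 + 1 else st.1, 0)) (0, 0)
      = (0, 0) := by
  induction l with
  | nil => rfl
  | cons x l ih => simpa using ih

-- A's row nest, canonicalized
lemma A_rows (array : List (List String)) (N M : Nat)
    (hlen : N ≤ array.length) (hrows : ∀ r ∈ array.take N, M ≤ r.length) :
    (PySem.List.pyRange 0 (N : Int) 1).foldl (fun (st : Int × Int) i =>
        let st2 := (PySem.List.pyRange 0 (M : Int) 1).foldl (fun (st : Int × Int) j =>
            let c := PySem.List.pyGetD (PySem.List.pyGetD array i []) j ""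
            if c = "-" then (st.1, st.2 + 1)
            else if st.2 ≠ 0 ∧ c = "|" then (st.1 + 1, 0)
            else st) st
        (if st2.2 ≠ 0 then st2.1 + 1 else st2.1, 0)) (0, 0)
      = (((array.take N).map
            (fun row => (runCnt "|" "-" (row.take M) false : Int))).sum, 0) := by
  rw [foldl_pyRange_take array ([] : List String) N hlen
      (fun (st : Int × Int) row =>
        let st2 := (PySem.List.pyRange 0 (M : Int) 1).foldl (fun (st : Int × Int) j =>
            let c := PySem.List.pyGetD row j ""
            if c = "-" then (st.1, st.2 + 1)
            else if st.2 ≠ 0 ∧ c = "|" then (st.1 + 1, 0)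
            else st) st
        (if st2.2 ≠ 0 then st2.1 + 1 else st2.1, 0)) (0, 0)]
  rw [PySem.List.foldl_congr_mem (array.take N)
      (fun (st : Int × Int) row =>
        let st2 := (PySem.List.pyRange 0 (M : Int) 1).foldl (fun (st : Int × Int) j =>
            let c := PySem.List.pyGetD row j ""
            if c = "-" then (st.1, st.2 + 1)
            else if st.2 ≠ 0 ∧ c = "|" then (st.1 + 1, 0)
            else st) st
        (if st2.2 ≠ 0 then st2.1 + 1 else st2.1, 0))
      (fun (st : Int × Int) row =>
        let st2 := (row.take M).foldl (fun (st : Int × Int) c =>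
            if c = "-" then (st.1, st.2 + 1)
            else if st.2 ≠ 0 ∧ c = "|" then (st.1 + 1, 0)
            else st) st
        (if st2.2 ≠ 0 then st2.1 + 1 else st2.1, 0))
      (0, 0)
      (by
        intro acc row hrow
        simp only [foldl_pyRange_take row "" M (hrows row hrow)
          (fun (st : Int × Int) c =>
            if c = "-" then (st.1, st.2 + 1)
            else if st.2 ≠ 0 ∧ c = "|" then (st.1 + 1, 0)
            else st) acc])]
  rw [show List.foldl (fun (st : Int × Int) row =>
        let st2 := (row.take M).foldl (fun (st : Int × Int) c =>
            if c = "-" then (st.1, st.2 + 1)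
            else if st.2 ≠ 0 ∧ c = "|" then (st.1 + 1, 0)
            else st) st
        (if st2.2 ≠ 0 then st2.1 + 1 else st2.1, 0)) (0, 0) (array.take N)
      = List.foldl (fun (st : Int × Int) cells =>
        let st2 := cells.foldl (fun (st : Int × Int) c =>
            if c = "-" then (st.1, st.2 + 1)
            else if st.2 ≠ 0 ∧ c = "|" then (st.1 + 1, 0)
            else st) st
        (if st2.2 ≠ 0 then st2.1 + 1 else st2.1, 0)) (0, 0)
          ((array.take N).map (fun row => row.take M))
      from (List.foldl_map (f := fun row : List String => row.take M)
        (g := fun (st : Int × Int) cells =>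
          let st2 := cells.foldl (fun (st : Int × Int) c =>
              if c = "-" then (st.1, st.2 + 1)
              else if st.2 ≠ 0 ∧ c = "|" then (st.1 + 1, 0)
              else st) st
          (if st2.2 ≠ 0 then st2.1 + 1 else st2.1, 0))
        (l := array.take N) (init := ((0 : Int), (0 : Int)))).symm]
  rw [rowFold "|" "-" (by decide) ((array.take N).map (fun row => row.take M)) 0]
  rw [List.map_map, zero_add]
  rfl

-- A's column nest, canonicalized
lemma A_cols (array : List (List String)) (N M : Nat)
    (hlen : N ≤ array.length) (r : Int) :
    (PySem.List.pyRange 0 (M : Int) 1).foldl (fun (st : Int × Int) i =>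
        let st2 := (PySem.List.pyRange 0 (N : Int) 1).foldl (fun (st : Int × Int) j =>
            let c := PySem.List.pyGetD (PySem.List.pyGetD array j []) i ""
            if c = "|" then (st.1, st.2 + 1)
            else if st.2 ≠ 0 ∧ c = "-" then (st.1 + 1, 0)
            else st) st
        (if st2.2 ≠ 0 then st2.1 + 1 else st2.1, 0)) (r, 0)
      = (r + ((PySem.List.pyRange 0 (M : Int) 1).map (fun i =>
            (runCnt "-" "|" ((array.take N).map
              (fun row => PySem.List.pyGetD row i "")) false : Int))).sum, 0) := by
  rw [PySem.List.foldl_congr_mem (PySem.List.pyRange 0 (M : Int) 1)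
      (fun (st : Int × Int) i =>
        let st2 := (PySem.List.pyRange 0 (N : Int) 1).foldl (fun (st : Int × Int) j =>
            let c := PySem.List.pyGetD (PySem.List.pyGetD array j []) i ""
            if c = "|" then (st.1, st.2 + 1)
            else if st.2 ≠ 0 ∧ c = "-" then (st.1 + 1, 0)
            else st) st
        (if st2.2 ≠ 0 then st2.1 + 1 else st2.1, 0))
      (fun (st : Int × Int) i =>
        let st2 := ((array.take N).map (fun row => PySem.List.pyGetD row i "")).foldl
            (fun (st : Int × Int) c =>
            if c = "|" then (st.1, st.2 + 1)
            else if st.2 ≠ 0 ∧ c = "-" then (st.1 + 1, 0)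
            else st) st
        (if st2.2 ≠ 0 then st2.1 + 1 else st2.1, 0))
      (r, 0)
      (by
        intro acc i _
        simp only [foldl_pyRange_take array ([] : List String) N hlen
          (fun (st : Int × Int) row =>
            let c := PySem.List.pyGetD row i ""
            if c = "|" then (st.1, st.2 + 1)
            else if st.2 ≠ 0 ∧ c = "-" then (st.1 + 1, 0)
            else st) acc, List.foldl_map])]
  rw [show List.foldl (fun (st : Int × Int) i =>
        let st2 := ((array.take N).map (fun row => PySem.List.pyGetD row i "")).foldl
            (fun (st : Int × Int) c =>
            if c = "|" then (st.1, st.2 + 1)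
            else if st.2 ≠ 0 ∧ c = "-" then (st.1 + 1, 0)
            else st) st
        (if st2.2 ≠ 0 then st2.1 + 1 else st2.1, 0)) (r, 0) (PySem.List.pyRange 0 (M : Int) 1)
      = List.foldl (fun (st : Int × Int) cells =>
        let st2 := cells.foldl (fun (st : Int × Int) c =>
            if c = "|" then (st.1, st.2 + 1)
            else if st.2 ≠ 0 ∧ c = "-" then (st.1 + 1, 0)
            else st) st
        (if st2.2 ≠ 0 then st2.1 + 1 else st2.1, 0)) (r, 0)
          ((PySem.List.pyRange 0 (M : Int) 1).map (fun i =>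
            (array.take N).map (fun row => PySem.List.pyGetD row i "")))
      from (List.foldl_map (f := fun i : Int =>
          (array.take N).map (fun row => PySem.List.pyGetD row i ""))
        (g := fun (st : Int × Int) cells =>
          let st2 := cells.foldl (fun (st : Int × Int) c =>
              if c = "|" then (st.1, st.2 + 1)
              else if st.2 ≠ 0 ∧ c = "-" then (st.1 + 1, 0)
              else st) st
          (if st2.2 ≠ 0 then st2.1 + 1 else st2.1, 0))
        (l := PySem.List.pyRange 0 (M : Int) 1) (init := (r, (0 : Int)))).symm]
  rw [rowFold "-" "|" (by decide) _ r]
  rw [List.map_map]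
  rfl

-- B's row list, canonicalized
lemma B_rows (array : List (List String)) (N M : Nat) (hlen : N ≤ array.length) :
    (PySem.List.pyRange 0 (N : Int) 1).map
        (fun i => PySem.List.slice (PySem.List.pyGetD array i []) none (some (M : Int)))
      = (array.take N).map (fun row => row.take M) := by
  have h1 : (PySem.List.pyRange 0 (N : Int) 1).map
      (fun i => PySem.List.slice (PySem.List.pyGetD array i []) none (some (M : Int)))
    = ((PySem.List.pyRange 0 (N : Int) 1).map (fun i => PySem.List.pyGetD array i [])).map
        (fun row => PySem.List.slice row none (some (M : Int))) := by
    simp [List.map_map, Function.comp]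
  rw [h1, map_pyRange_take array ([] : List String) N hlen]
  apply List.map_congr_left
  intro row _
  rw [PySem.List.slice_to row (by positivity)]
  simp

-- B's value, canonicalized
lemma B_canon (array : List (List String)) (N M : Nat) (hN : 0 < N) (hM : 0 < M)
    (hlen : N ≤ array.length) (hrows : ∀ r ∈ array.take N, M ≤ r.length) :
    cnt_wood_alt array (N : Int) (M : Int)
      = ((array.take N).map (fun row => (runCnt "|" "-" (row.take M) false : Int))).sum
        + ((PySem.List.pyRange 0 (M : Int) 1).map (fun i =>
            (runCnt "-" "|" ((array.take N).map
              (fun row => PySem.List.pyGetD row i "")) false : Int))).sum := by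
  unfold cnt_wood_alt
  rw [if_neg (by push_neg; constructor <;> [exact_mod_cast hN; exact_mod_cast hM])]
  simp only [B_rows array N M hlen, countPieces_eq]
  congr 1
  · apply congrArg List.sum
    rw [List.map_map]
    apply List.map_congr_left
    intro row _
    simp [Function.comp]
  · apply congrArg List.sum
    rw [List.map_map]
    apply List.map_congr_left
    intro i hi
    rw [PySem.List.mem_pyRange_one] at hi
    simp only [Function.comp_apply]
    have hXY : ((array.take N).map (fun row => row.take M)).map
          (fun row => PySem.List.pyGetD row i "")
        = (array.take N).map (fun row => PySem.List.pyGetD row i "") := by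
      rw [List.map_map]
      apply List.map_congr_left
      intro row hrow
      simp only [Function.comp_apply]
      exact pyGetD_take_eq row "" M i hi.1 hi.2 (hrows row hrow)
    rw [hXY]

-- ===== VERDICT (by name: the statement is the Claim_ definition above) =====
theorem cnt_wood_spec : Claim_equal_cnt_wood := by
  intro array n m _ hpre
  unfold Spec_cnt_wood cnt_wood
  by_cases hnm : n ≤ 0 ∨ m ≤ 0
  · unfold cnt_wood_alt
    rw [if_pos hnm]
    rcases hnm with hn | hm
    · simp only [PySem.List.pyRange_one_eq_nil hn, List.foldl_nil]
      simpa using congrArg Prod.fst (trivFold (PySem.List.pyRange 0 m 1))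
    · simp only [PySem.List.pyRange_one_eq_nil hm, List.foldl_nil]
      simpa using congrArg Prod.fst (trivFold (PySem.List.pyRange 0 n 1))
  · push_neg at hnm
    obtain ⟨hn, hm⟩ := hnm
    obtain ⟨hlen, hrows⟩ := hpre ⟨hn, hm⟩
    have hn' : n = (n.toNat : Int) := (Int.toNat_of_nonneg (le_of_lt hn)).symm
    have hm' : m = (m.toNat : Int) := (Int.toNat_of_nonneg (le_of_lt hm)).symm
    rw [hn', hm']
    rw [A_rows array n.toNat m.toNat hlen hrows]
    rw [A_cols array n.toNat m.toNat hlen]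
    rw [B_canon array n.toNat m.toNat (by omega) (by omega) hlen hrows]
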